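-- pv_equiv track=rewrite | github.com/ericc59/aria | aria/search/geometry.py | boundary_cells
-- ===== SOURCE A (Python) =====
-- from dataclasses import dataclass
-- from typing import Iterable, Literal
--
-- Direction = Literal["up", "down", "left", "right"]
--
-- @dataclass(frozen=True)
-- class BBox:
--     top: int
--     bottom: int
--     left: int
--     right: int
--
--     @property
--     def height(self) -> int:
--         return self.bottom - self.top + 1
--
--     @property
--     def width(self) -> int:
--         return self.right - self.left + 1
--
-- def bbox(cells: Iterable[tuple[int, int]]) -> BBox:
--     """Bounding box of a non-empty cell set."""
--     pts = list(cells)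
--     if not pts:
--         raise ValueError("bbox() requires at least one cell")
--     rs = [r for r, _ in pts]
--     cs = [c for _, c in pts]
--     return BBox(min(rs), max(rs), min(cs), max(cs))
--
-- def boundary_cells(cells: Iterable[tuple[int, int]], direction: Direction) -> list[tuple[int, int]]:
--     """Cells on one boundary of a component bbox."""
--     pts = list(cells)
--     bounds = bbox(pts)
--     if direction == "up":
--         return [(r, c) for r, c in pts if r == bounds.top]
--     if direction == "down":
--         return [(r, c) for r, c in pts if r == bounds.bottom]
--     if direction == "left":
--         return [(r, c) for r, c in pts if c == bounds.left]
--     return [(r, c) for r, c in pts if c == bounds.right]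
-- ===== SOURCE B (Python) =====
-- def boundary_cells(cells, direction):
--     pts = list(cells)
--     if not pts:
--         raise ValueError("bbox() requires at least one cell")
--     axis = 0 if direction in ("up", "down") else 1
--     want_max = direction == "down" or (direction != "up" and direction != "left")
--     best = None
--     out = []
--     for p in pts:
--         v = p[axis]
--         if best is None or (v > best if want_max else v < best):
--             best = v
--             out = [p]
--         elif v == best:
--             out.append(p)
--     return out
-- ===== Notes on version B (the rewrite author's own statement) =====
-- stated objective: alternative
-- what changed: Replaces bbox computation (four min/max scans) plus a filtering comprehension with a single pass that keeps a running best coordinate and an accumulator of tied cells, resetting on a strictly better value.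
import Mathlib
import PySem

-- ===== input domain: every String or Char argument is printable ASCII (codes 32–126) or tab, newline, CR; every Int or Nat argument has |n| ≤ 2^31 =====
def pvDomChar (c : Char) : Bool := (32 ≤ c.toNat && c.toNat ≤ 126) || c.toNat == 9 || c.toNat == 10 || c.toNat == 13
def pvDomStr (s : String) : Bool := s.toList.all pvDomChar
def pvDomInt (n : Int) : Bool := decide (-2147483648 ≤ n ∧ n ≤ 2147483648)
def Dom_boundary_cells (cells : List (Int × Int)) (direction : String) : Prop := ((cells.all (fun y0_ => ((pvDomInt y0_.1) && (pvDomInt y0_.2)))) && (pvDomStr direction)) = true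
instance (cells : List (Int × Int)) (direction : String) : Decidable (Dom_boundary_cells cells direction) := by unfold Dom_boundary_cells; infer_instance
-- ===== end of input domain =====

-- B is one pass with a running best coordinate and accumulator, instead of A's bbox (4 min/max scans) plus a filter; same cost, different decomposition.

-- ===== PORT A =====
-- bbox(): min/max of the row and column projections; none = the ValueError on empty input
def pvBboxA (pts : List (Int × Int)) : Option (Int × Int × Int × Int) :=
  let rs := pts.map Prod.fst
  let cs := pts.map Prod.snd
  match PySem.List.min? rs (fun x => x), PySem.List.max? rs (fun x => x),
        PySem.List.min? cs (fun x => x), PySem.List.max? cs (fun x => x) with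
  | some t, some b, some l, some r => some (t, b, l, r)
  | _, _, _, _ => none

def boundary_cells (cells : List (Int × Int)) (direction : String) : List (Int × Int) :=
  match pvBboxA cells with
  | none => []   -- A raises ValueError here; excluded by Pre_
  | some (t, b, l, r) =>
    if direction = "up" then cells.filter (fun p => p.1 == t)
    else if direction = "down" then cells.filter (fun p => p.1 == b)
    else if direction = "left" then cells.filter (fun p => p.2 == l)
    else cells.filter (fun p => p.2 == r)

-- ===== PORT B =====
def pvStep (axisFst wantMax : Bool) (st : Option Int × List (Int × Int)) (p : Int × Int) :
    Option Int × List (Int × Int) :=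
  let v := if axisFst then p.1 else p.2
  match st.1 with
  | none => (some v, [p])
  | some b =>
    if (if wantMax then b < v else v < b) then (some v, [p])
    else if v == b then (st.1, st.2 ++ [p])
    else st

def boundary_cells_alt (cells : List (Int × Int)) (direction : String) : List (Int × Int) :=
  let axisFst := direction == "up" || direction == "down"
  let wantMax := direction == "down" || (direction != "up" && direction != "left")
  (cells.foldl (pvStep axisFst wantMax) (none, [])).2

-- ===== PRECONDITION & SPEC =====
-- Pre_ excludes only the empty list, on which A raises ValueError("bbox() requires at least one cell")
def Pre_boundary_cells (cells : List (Int × Int)) (direction : String) : Prop := cells ≠ []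
instance (cells : List (Int × Int)) (direction : String) : Decidable (Pre_boundary_cells cells direction) := by unfold Pre_boundary_cells; infer_instance
def pvWitness_boundary_cells : (List (Int × Int)) × String := ([(0, 1), (2, 1)], "up")

def Spec_boundary_cells (cells : List (Int × Int)) (direction : String) (out : List (Int × Int)) : Prop := out = boundary_cells_alt cells direction
instance (cells : List (Int × Int)) (direction : String) (out : List (Int × Int)) : Decidable (Spec_boundary_cells cells direction out) := by unfold Spec_boundary_cells; infer_instance

-- ===== CLAIM (what is proved, stated in full; the proofs are below) =====
def Claim_equal_boundary_cells : Prop := ∀ (cells : List (Int × Int)) (direction : String), Dom_boundary_cells cells direction → Pre_boundary_cells cells direction → Spec_boundary_cells cells direction (boundary_cells cells direction)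

-- ===== LEMMAS AND PROOFS =====

-- key selected by the axis flag
def pvKey (axisFst : Bool) (p : Int × Int) : Int := if axisFst then p.1 else p.2

-- running-extremum invariants: once the best is b and the accumulator holds the b-matches of the
-- processed prefix, the rest of the fold yields the running max (resp. min) and the matches of the whole list
theorem pvRunMax (axisFst : Bool) :
    ∀ (t pre : List (Int × Int)) (b : Int),
      (∀ p ∈ pre, pvKey axisFst p ≤ b) →
      t.foldl (pvStep axisFst true) (some b, pre.filter (fun p => pvKey axisFst p == b))
        = (some (t.foldl (fun m p => max m (pvKey axisFst p)) b),
           (pre ++ t).filter (fun p => pvKey axisFst p == t.foldl (fun m p => max m (pvKey axisFst p)) b)) := by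
  intro t
  induction t with
  | nil => intro pre b h; simp
  | cons p rest ih =>
    intro pre b h
    simp only [List.foldl_cons]
    by_cases hlt : b < pvKey axisFst p
    · have hstep : pvStep axisFst true (some b, pre.filter (fun q => pvKey axisFst q == b)) p
          = (some (pvKey axisFst p), [p]) := by
        simp only [pvKey] at hlt; simp [pvStep, hlt, pvKey]
      rw [hstep]
      have hmax : max b (pvKey axisFst p) = pvKey axisFst p := max_eq_right hlt.le
      have hfil : (pre ++ [p]).filter (fun q => pvKey axisFst q == pvKey axisFst p) = [p] := by
        rw [List.filter_append]
        have : pre.filter (fun q => pvKey axisFst q == pvKey axisFst p) = [] := by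
          rw [List.filter_eq_nil_iff]
          intro q hq
          have := h q hq
          simp only [beq_iff_eq]
          omega
        simp [this]
      have h' : ∀ q ∈ pre ++ [p], pvKey axisFst q ≤ pvKey axisFst p := by
        intro q hq
        rcases List.mem_append.1 hq with hq | hq
        · exact (h q hq).trans hlt.le
        · simp at hq; subst hq; rfl
      have := ih (pre ++ [p]) (pvKey axisFst p) h'
      rw [hfil] at this
      rw [this]
      simp [hmax, List.append_assoc]
    · by_cases heq : pvKey axisFst p = b
      · have hstep : pvStep axisFst true (some b, pre.filter (fun q => pvKey axisFst q == b)) p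
            = (some b, pre.filter (fun q => pvKey axisFst q == b) ++ [p]) := by
          simp only [pvKey] at hlt heq; simp [pvStep, heq, pvKey]
        rw [hstep]
        have hmax : max b (pvKey axisFst p) = b := by omega
        have hfil : (pre ++ [p]).filter (fun q => pvKey axisFst q == b)
            = pre.filter (fun q => pvKey axisFst q == b) ++ [p] := by
          rw [List.filter_append]; simp [heq]
        have h' : ∀ q ∈ pre ++ [p], pvKey axisFst q ≤ b := by
          intro q hq
          rcases List.mem_append.1 hq with hq | hq
          · exact h q hq
          · simp at hq; subst hq; omega
        have := ih (pre ++ [p]) b h'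
        rw [hfil] at this
        rw [this]
        simp [hmax, List.append_assoc]
      · have hstep : pvStep axisFst true (some b, pre.filter (fun q => pvKey axisFst q == b)) p
            = (some b, pre.filter (fun q => pvKey axisFst q == b)) := by
          simp only [pvKey] at hlt heq; simp [pvStep, heq, pvKey]; omega
        rw [hstep]
        have hfil : (pre ++ [p]).filter (fun q => pvKey axisFst q == b)
            = pre.filter (fun q => pvKey axisFst q == b) := by
          rw [List.filter_append]; simp [heq]
        have hmax : max b (pvKey axisFst p) = b := by
          simp only [pvKey] at hlt ⊢; omega
        have h' : ∀ q ∈ pre ++ [p], pvKey axisFst q ≤ b := by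
          intro q hq
          rcases List.mem_append.1 hq with hq | hq
          · exact h q hq
          · simp at hq; subst hq; omega
        have := ih (pre ++ [p]) b h'
        rw [hfil] at this
        rw [this]
        simp [hmax, List.append_assoc]

theorem pvRunMin (axisFst : Bool) :
    ∀ (t pre : List (Int × Int)) (b : Int),
      (∀ p ∈ pre, b ≤ pvKey axisFst p) →
      t.foldl (pvStep axisFst false) (some b, pre.filter (fun p => pvKey axisFst p == b))
        = (some (t.foldl (fun m p => min m (pvKey axisFst p)) b),
           (pre ++ t).filter (fun p => pvKey axisFst p == t.foldl (fun m p => min m (pvKey axisFst p)) b)) := by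
  intro t
  induction t with
  | nil => intro pre b h; simp
  | cons p rest ih =>
    intro pre b h
    simp only [List.foldl_cons]
    by_cases hlt : pvKey axisFst p < b
    · have hstep : pvStep axisFst false (some b, pre.filter (fun q => pvKey axisFst q == b)) p
          = (some (pvKey axisFst p), [p]) := by
        simp only [pvKey] at hlt; simp [pvStep, hlt, pvKey]
      rw [hstep]
      have hmin : min b (pvKey axisFst p) = pvKey axisFst p := min_eq_right hlt.le
      have hfil : (pre ++ [p]).filter (fun q => pvKey axisFst q == pvKey axisFst p) = [p] := by
        rw [List.filter_append]
        have : pre.filter (fun q => pvKey axisFst q == pvKey axisFst p) = [] := by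
          rw [List.filter_eq_nil_iff]
          intro q hq
          have := h q hq
          simp only [beq_iff_eq]
          omega
        simp [this]
      have h' : ∀ q ∈ pre ++ [p], pvKey axisFst p ≤ pvKey axisFst q := by
        intro q hq
        rcases List.mem_append.1 hq with hq | hq
        · exact hlt.le.trans (h q hq)
        · simp at hq; subst hq; rfl
      have := ih (pre ++ [p]) (pvKey axisFst p) h'
      rw [hfil] at this
      rw [this]
      simp [hmin, List.append_assoc]
    · by_cases heq : pvKey axisFst p = b
      · have hstep : pvStep axisFst false (some b, pre.filter (fun q => pvKey axisFst q == b)) p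
            = (some b, pre.filter (fun q => pvKey axisFst q == b) ++ [p]) := by
          simp only [pvKey] at hlt heq; simp [pvStep, heq, pvKey]
        rw [hstep]
        have hmin : min b (pvKey axisFst p) = b := by omega
        have hfil : (pre ++ [p]).filter (fun q => pvKey axisFst q == b)
            = pre.filter (fun q => pvKey axisFst q == b) ++ [p] := by
          rw [List.filter_append]; simp [heq]
        have h' : ∀ q ∈ pre ++ [p], b ≤ pvKey axisFst q := by
          intro q hq
          rcases List.mem_append.1 hq with hq | hq
          · exact h q hq
          · simp at hq; subst hq; omega
        have := ih (pre ++ [p]) b h'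
        rw [hfil] at this
        rw [this]
        simp [hmin, List.append_assoc]
      · have hstep : pvStep axisFst false (some b, pre.filter (fun q => pvKey axisFst q == b)) p
            = (some b, pre.filter (fun q => pvKey axisFst q == b)) := by
          simp only [pvKey] at hlt heq; simp [pvStep, heq, pvKey]; omega
        rw [hstep]
        have hfil : (pre ++ [p]).filter (fun q => pvKey axisFst q == b)
            = pre.filter (fun q => pvKey axisFst q == b) := by
          rw [List.filter_append]; simp [heq]
        have hmin : min b (pvKey axisFst p) = b := by
          simp only [pvKey] at hlt ⊢; omega
        have h' : ∀ q ∈ pre ++ [p], b ≤ pvKey axisFst q := by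
          intro q hq
          rcases List.mem_append.1 hq with hq | hq
          · exact h q hq
          · simp at hq; subst hq; omega
        have := ih (pre ++ [p]) b h'
        rw [hfil] at this
        rw [this]
        simp [hmin, List.append_assoc]

theorem pvAltCons (axisFst wantMax : Bool) (h : Int × Int) (t : List (Int × Int)) :
    (h :: t).foldl (pvStep axisFst wantMax) (none, [])
      = t.foldl (pvStep axisFst wantMax) (some (pvKey axisFst h), [h].filter (fun p => pvKey axisFst p == pvKey axisFst h)) := by
  simp [pvStep, pvKey]

theorem pvAltMax (axisFst : Bool) (h : Int × Int) (t : List (Int × Int)) :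
    ((h :: t).foldl (pvStep axisFst true) (none, [])).2
      = (h :: t).filter (fun p => pvKey axisFst p == t.foldl (fun m p => max m (pvKey axisFst p)) (pvKey axisFst h)) := by
  rw [pvAltCons, pvRunMax axisFst t [h] (pvKey axisFst h) (by simp)]; rfl

theorem pvAltMin (axisFst : Bool) (h : Int × Int) (t : List (Int × Int)) :
    ((h :: t).foldl (pvStep axisFst false) (none, [])).2
      = (h :: t).filter (fun p => pvKey axisFst p == t.foldl (fun m p => min m (pvKey axisFst p)) (pvKey axisFst h)) := by
  rw [pvAltCons, pvRunMin axisFst t [h] (pvKey axisFst h) (by simp)]; rfl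

theorem pvBboxA_cons (h : Int × Int) (t : List (Int × Int)) :
    pvBboxA (h :: t)
      = some (t.foldl (fun m p => min m p.1) h.1, t.foldl (fun m p => max m p.1) h.1,
              t.foldl (fun m p => min m p.2) h.2, t.foldl (fun m p => max m p.2) h.2) := by
  simp [pvBboxA, PySem.List.min?_id_cons, PySem.List.max?_id_cons, List.foldl_map]

-- ===== VERDICT (by name: the statement is the Claim_ definition above) =====
theorem boundary_cells_spec : Claim_equal_boundary_cells := by
  intro cells direction _ hpre
  unfold Spec_boundary_cells
  cases cells with
  | nil => exact absurd rfl hpre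
  | cons h t =>
    unfold boundary_cells boundary_cells_alt
    rw [pvBboxA_cons]
    by_cases hu : direction = "up"
    · subst hu
      simp only [reduceIte]
      rw [show (("up" == "up" || "up" == "down") : Bool) = true from rfl,
          show (("up" == "down" || ("up" != "up" && "up" != "left")) : Bool) = false from rfl]
      rw [pvAltMin true h t]
      simp [pvKey]
    · by_cases hd : direction = "down"
      · subst hd
        simp only [reduceIte]
        rw [show (("down" == "up" || "down" == "down") : Bool) = true from rfl,
            show (("down" == "down" || ("down" != "up" && "down" != "left")) : Bool) = true from rfl]
        rw [pvAltMax true h t]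
        simp [pvKey]
      · by_cases hl : direction = "left"
        · subst hl
          simp only [reduceIte]
          rw [show (("left" == "up" || "left" == "down") : Bool) = false from rfl,
              show (("left" == "down" || ("left" != "up" && "left" != "left")) : Bool) = false from rfl]
          rw [pvAltMin false h t]
          simp [pvKey]
        · simp only [if_neg hu, if_neg hd, if_neg hl]
          have h1 : ((direction == "up" || direction == "down") : Bool) = false := by
            simp [hu, hd]
          have h2 : ((direction == "down" || (direction != "up" && direction != "left")) : Bool) = true := by
            simp [hd, hu, hl]
          rw [h1, h2, pvAltMax false h t]
          simp [pvKey]
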